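-- pv_equiv track=rewrite | github.com/ajoxf/Statistical-Arbitrage-_1 | app.py | is_forex_symbol
-- ===== SOURCE A (Python) =====
-- def is_forex_symbol(symbol):
--     """Check if symbol is a forex/currency pair"""
--     symbol_upper = symbol.upper()
--     if symbol_upper.endswith('=X'):
--         return True
--     forex_pairs = ['EUR', 'USD', 'GBP', 'JPY', 'CHF', 'AUD', 'CAD', 'NZD', 'CNY', 'HKD']
--     for curr1 in forex_pairs:
--         for curr2 in forex_pairs:
--             if curr1 != curr2 and (f'{curr1}{curr2}' in symbol_upper or f'{curr2}{curr1}' in symbol_upper):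
--                 return True
--     return False
-- ===== SOURCE B (Python) =====
-- FOREX_CODES = {'EUR', 'USD', 'GBP', 'JPY', 'CHF', 'AUD', 'CAD', 'NZD', 'CNY', 'HKD'}
--
-- def is_forex_symbol(symbol):
--     """Check if symbol is a forex/currency pair"""
--     s = symbol.upper()
--     if s.endswith('=X'):
--         return True
--     for i in range(len(s) - 5):
--         a = s[i:i+3]
--         b = s[i+3:i+6]
--         if a in FOREX_CODES and b in FOREX_CODES and a != b:
--             return True
--     return False
-- ===== Notes on version B (the rewrite author's own statement) =====
-- stated objective: simpler
-- what changed: Replaces the 10x10 nested enumeration of ordered currency pairs with substring searches by a single left-to-right scan of the symbol that checks each 6-character window against a set of the 10 codes.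
import Mathlib
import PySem

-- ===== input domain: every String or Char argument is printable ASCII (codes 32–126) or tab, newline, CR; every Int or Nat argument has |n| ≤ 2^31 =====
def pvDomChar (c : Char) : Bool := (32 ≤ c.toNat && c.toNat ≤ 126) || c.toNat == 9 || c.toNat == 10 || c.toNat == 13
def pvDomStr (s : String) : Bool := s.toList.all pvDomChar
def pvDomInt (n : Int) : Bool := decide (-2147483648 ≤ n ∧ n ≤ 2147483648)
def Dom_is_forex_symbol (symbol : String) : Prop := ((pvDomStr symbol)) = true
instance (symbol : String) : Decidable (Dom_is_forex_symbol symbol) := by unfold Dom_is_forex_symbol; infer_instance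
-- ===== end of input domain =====

-- B replaces A's nested enumeration of ordered code pairs (each checked by a
-- substring search) with a single scan of the 6-character windows of the symbol
-- against a set of the ten codes (objective: simpler).

-- ===== PORT A =====
def forexPairsA : List String :=
  ["EUR", "USD", "GBP", "JPY", "CHF", "AUD", "CAD", "NZD", "CNY", "HKD"]

def is_forex_symbol (symbol : String) : Bool :=
  let symbol_upper := PySem.Str.upper symbol
  if PySem.Str.endswith symbol_upper "=X" then true
  else
    forexPairsA.any (fun curr1 => forexPairsA.any (fun curr2 =>
      decide (curr1 ≠ curr2) &&
        (PySem.Str.isIn (curr1 ++ curr2) symbol_upper ||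
         PySem.Str.isIn (curr2 ++ curr1) symbol_upper)))

-- ===== PORT B =====
def forexCodes : PySem.Set String :=
  PySem.Set.ofList ["EUR", "USD", "GBP", "JPY", "CHF", "AUD", "CAD", "NZD", "CNY", "HKD"]

def is_forex_symbol_alt (symbol : String) : Bool :=
  let s := PySem.Str.upper symbol
  if PySem.Str.endswith s "=X" then true
  else
    (PySem.List.pyRange 0 (PySem.Str.len s - 5) 1).any (fun i =>
      let a := PySem.Str.slice s (some i) (some (i + 3))
      let b := PySem.Str.slice s (some (i + 3)) (some (i + 6))
      PySem.Set.contains forexCodes a && (PySem.Set.contains forexCodes b && decide (a ≠ b)))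

-- ===== PRECONDITION & SPEC =====
def Spec_is_forex_symbol (symbol : String) (out : Bool) : Prop := out = is_forex_symbol_alt symbol
instance (symbol : String) (out : Bool) : Decidable (Spec_is_forex_symbol symbol out) := by unfold Spec_is_forex_symbol; infer_instance

-- ===== CLAIM (what is proved, stated in full; the proofs are below) =====
def Claim_equal_is_forex_symbol : Prop := ∀ (symbol : String), Dom_is_forex_symbol symbol → Spec_is_forex_symbol symbol (is_forex_symbol symbol)

-- ===== LEMMAS AND PROOFS =====

theorem pv_bool_ext {a b : Bool} (h : a = true ↔ b = true) : a = b := by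
  cases a <;> cases b <;> simp_all

-- all ten currency codes have exactly three characters
theorem forexPairsA_len : ∀ c ∈ forexPairsA, c.toList.length = 3 := by decide

theorem mem_forexCodes (x : String) : x ∈ forexCodes ↔ x ∈ forexPairsA := by
  rw [forexCodes, PySem.Set.mem_ofList, forexPairsA]

-- an occurrence of a concatenation of two distinct codes yields a window
theorem occ_window (P : List String) (hP : ∀ c ∈ P, c.toList.length = 3) (L : List Char)
    {c1 c2 : String} (h1 : c1 ∈ P) (h2 : c2 ∈ P) (hne : c1 ≠ c2)
    (hinf : c1.toList ++ c2.toList <:+: L) :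
    ∃ i : Int, (0 ≤ i ∧ i < (L.length : Int) - 5) ∧
      ∃ d1, d1 ∈ P ∧ ∃ d2, d2 ∈ P ∧ (¬ d1 = d2 ∧
        (L.drop i.toNat).take 3 = d1.toList ∧ (L.drop (i.toNat + 3)).take 3 = d2.toList) := by
  obtain ⟨pre, suf, heq⟩ := hinf
  have hl1 := hP c1 h1
  have hl2 := hP c2 h2
  have hL : L = pre ++ (c1.toList ++ (c2.toList ++ suf)) := by
    rw [← heq]; simp [List.append_assoc]
  have hlen : L.length = pre.length + (3 + (3 + suf.length)) := by
    rw [hL]; simp [hl1, hl2]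
  refine ⟨(pre.length : Int), ⟨by positivity, by omega⟩,
    c1, h1, c2, h2, hne, ?_, ?_⟩
  · rw [Int.toNat_natCast, hL, List.drop_left, List.take_left' hl1]
  · rw [Int.toNat_natCast, hL]
    have hd : (pre ++ (c1.toList ++ (c2.toList ++ suf))).drop (pre.length + 3)
        = c2.toList ++ suf := by
      rw [← List.drop_drop, List.drop_left, List.drop_left' hl1]
    rw [hd, List.take_left' hl2]

-- the combinatorial core: "some ordered pair of distinct codes occurs as a
-- substring of L" ↔ "some 6-char window of L splits into two distinct codes"
theorem window_core (P : List String) (hP : ∀ c ∈ P, c.toList.length = 3) (L : List Char) :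
    (∃ c1, c1 ∈ P ∧ ∃ c2, c2 ∈ P ∧ (¬ c1 = c2 ∧
        (c1.toList ++ c2.toList <:+: L ∨ c2.toList ++ c1.toList <:+: L)))
    ↔ ∃ i : Int, (0 ≤ i ∧ i < (L.length : Int) - 5) ∧
        ∃ c1, c1 ∈ P ∧ ∃ c2, c2 ∈ P ∧ (¬ c1 = c2 ∧
          (L.drop i.toNat).take 3 = c1.toList ∧ (L.drop (i.toNat + 3)).take 3 = c2.toList) := by
  constructor
  · rintro ⟨c1, h1, c2, h2, hne, hor | hor⟩
    · exact occ_window P hP L h1 h2 hne hor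
    · exact occ_window P hP L h2 h1 (fun h => hne h.symm) hor
  · rintro ⟨i, ⟨hi0, hi5⟩, c1, h1, c2, h2, hne, hw1, hw2⟩
    have h6 : i.toNat + 6 ≤ L.length := by omega
    have hdd : (L.drop i.toNat).drop 3 = L.drop (i.toNat + 3) := by
      rw [List.drop_drop]
    have hsplit : (L.drop i.toNat).take 6 = c1.toList ++ c2.toList := by
      rw [show (6 : Nat) = 3 + 3 from rfl, List.take_add, hw1, hdd, hw2]
    have hinf : c1.toList ++ c2.toList <:+: L := by
      rw [← hsplit]
      exact ⟨L.take i.toNat, (L.drop i.toNat).drop 6, by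
        rw [List.append_assoc, List.take_append_drop, List.take_append_drop]⟩
    exact ⟨c1, h1, c2, h2, hne, Or.inl hinf⟩

-- B's window test at i, in the slice-free form used by window_core
theorem slice_mem_iff (su : String) (i : Int) (hi : 0 ≤ i) :
    (PySem.Str.slice su (some i) (some (i + 3)) ∈ forexCodes ∧
      (PySem.Str.slice su (some (i + 3)) (some (i + 6)) ∈ forexCodes ∧
        ¬ PySem.Str.slice su (some i) (some (i + 3))
            = PySem.Str.slice su (some (i + 3)) (some (i + 6))))
    ↔ ∃ c1, c1 ∈ forexPairsA ∧ ∃ c2, c2 ∈ forexPairsA ∧ (¬ c1 = c2 ∧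
        (su.toList.drop i.toNat).take 3 = c1.toList ∧
        (su.toList.drop (i.toNat + 3)).take 3 = c2.toList) := by
  have e0 : (i + 3).toNat - i.toNat = 3 := by omega
  have e3 : (i + 3).toNat = i.toNat + 3 := by omega
  have e6 : (i + 6).toNat - (i.toNat + 3) = 3 := by omega
  have h1 : (PySem.Str.slice su (some i) (some (i + 3))).toList
      = (su.toList.drop i.toNat).take 3 := by
    rw [PySem.Str.toList_slice, PySem.Chars.slice_eq_listSlice, PySem.List.slice_toNat, e0]
    · exact hi
    · omega
  have h2 : (PySem.Str.slice su (some (i + 3)) (some (i + 6))).toList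
      = (su.toList.drop (i.toNat + 3)).take 3 := by
    rw [PySem.Str.toList_slice, PySem.Chars.slice_eq_listSlice, PySem.List.slice_toNat, e3, e6]
    · omega
    · omega
  constructor
  · rintro ⟨ha, hb, hne⟩
    exact ⟨_, (mem_forexCodes _).mp ha, _, (mem_forexCodes _).mp hb,
      hne, h1.symm, h2.symm⟩
  · rintro ⟨c1, hc1, c2, hc2, hne, hw1, hw2⟩
    have e1 : PySem.Str.slice su (some i) (some (i + 3)) = c1 :=
      String.toList_inj.mp (h1.trans hw1)
    have e2 : PySem.Str.slice su (some (i + 3)) (some (i + 6)) = c2 :=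
      String.toList_inj.mp (h2.trans hw2)
    refine ⟨by rw [e1]; exact (mem_forexCodes _).mpr hc1,
      by rw [e2]; exact (mem_forexCodes _).mpr hc2, by rw [e1, e2]; exact hne⟩

theorem is_forex_symbol_spec : Claim_equal_is_forex_symbol := by
  intro symbol _
  unfold Spec_is_forex_symbol
  simp only [is_forex_symbol, is_forex_symbol_alt]
  cases hX : PySem.Str.endswith (PySem.Str.upper symbol) "=X"
  · simp only [Bool.false_eq_true, if_false]
    apply pv_bool_ext
    simp only [List.any_eq_true, Bool.and_eq_true, Bool.or_eq_true, decide_eq_true_eq,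
      PySem.Str.isIn_iff_infix, String.toList_append, PySem.List.mem_pyRange_one,
      PySem.Str.len_eq, PySem.Set.contains_iff, ne_eq]
    rw [window_core forexPairsA forexPairsA_len (PySem.Str.upper symbol).toList]
    exact exists_congr fun i => and_congr_right fun hb => (slice_mem_iff _ i hb.1).symm
  · simp
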